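-- pv_equiv track=rewrite | github.com/krmahi/rePython | Problems/append_subsequence.py | make_subsequence
-- ===== SOURCE A (Python) =====
-- def make_subsequence(s: str, t: str) -> int:
--     n = len(t)
--     if not s: return n
--     if not t: return 0
--     j = 0
--     for i in range(len(s)):
--         if j < n:
--             if s[i] == t[j]: j += 1
--     return 0 if j >= n else len(t[j:])
-- ===== SOURCE B (Python) =====
-- def make_subsequence(s: str, t: str) -> int:
--     def is_sub(u):
--         it = iter(s)
--         return all(ch in it for ch in u)
--     lo, hi = 0, len(t)
--     while lo < hi:
--         mid = (lo + hi + 1) // 2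
--         if is_sub(t[:mid]):
--             lo = mid
--         else:
--             hi = mid - 1
--     return len(t) - lo
-- ===== Notes on version B (the rewrite author's own statement) =====
-- stated objective: alternative
-- what changed: B binary-searches the largest k such that t[:k] is a subsequence of s, using an independent subsequence predicate per probe, instead of A's single greedy index-advancing scan over s; correct because 't[:k] is a subsequence of s' is monotone in k and the greedy match length is exactly that maximum k.
import Mathlib
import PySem

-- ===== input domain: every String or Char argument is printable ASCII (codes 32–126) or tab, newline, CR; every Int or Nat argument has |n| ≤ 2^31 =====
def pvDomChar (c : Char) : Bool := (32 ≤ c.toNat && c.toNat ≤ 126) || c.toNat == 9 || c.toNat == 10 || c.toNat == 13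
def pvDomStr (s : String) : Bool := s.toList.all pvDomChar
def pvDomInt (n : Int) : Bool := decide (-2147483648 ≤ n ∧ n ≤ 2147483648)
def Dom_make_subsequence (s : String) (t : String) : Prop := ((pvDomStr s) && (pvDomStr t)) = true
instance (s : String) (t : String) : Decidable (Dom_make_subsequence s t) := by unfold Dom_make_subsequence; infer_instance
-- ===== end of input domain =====

-- B replaces A's single greedy scan by a binary search over the answer (largest
-- prefix of t that is a subsequence of s), with an independent subsequence
-- predicate per probe; same result (proved), not faster.

-- ===== PORT A =====
-- A: loop over indices of s; j indexes into t; return 0 if j >= n else len(t[j:]).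
def make_subsequence (s : String) (t : String) : Int :=
  let tL := t.toList
  let sL := s.toList
  let n := tL.length
  if sL = [] then (n : Int)
  else if tL = [] then 0
  else
    let j := sL.foldl (fun j c =>
      if j < n then
        match tL[j]? with
        | some u => if c == u then j + 1 else j
        | none => j
      else j) 0
    if j ≥ n then 0 else ((tL.drop j).length : Int)

-- ===== PORT B =====
-- B's is_sub: 'all(ch in it for ch in u)' — each 'ch in it' consumes the
-- iterator over s up to and including the first occurrence of ch (False if it
-- exhausts); this recursion is exactly that consumption.
def pvIsSub : List Char → List Char → Bool
  | [], _ => true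
  | _ :: _, [] => false
  | u :: us, c :: cs => if c == u then pvIsSub us cs else pvIsSub (u :: us) cs

-- B's while-loop: binary search for the largest lo with is_sub(t[:lo]).
def pvBSearch (tL sL : List Char) (lo hi : Nat) : Nat :=
  if h : lo < hi then
    let mid := (lo + hi + 1) / 2
    if pvIsSub (tL.take mid) sL then pvBSearch tL sL mid hi
    else pvBSearch tL sL lo (mid - 1)
  else lo
termination_by hi - lo
decreasing_by all_goals omega

def make_subsequence_alt (s : String) (t : String) : Int :=
  (t.toList.length : Int) - (pvBSearch t.toList s.toList 0 t.toList.length : Int)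

-- ===== PRECONDITION & SPEC =====
def Spec_make_subsequence (s : String) (t : String) (out : Int) : Prop := out = make_subsequence_alt s t
instance (s : String) (t : String) (out : Int) : Decidable (Spec_make_subsequence s t out) := by unfold Spec_make_subsequence; infer_instance

-- ===== CLAIM (what is proved, stated in full; the proofs are below) =====
def Claim_equal_make_subsequence : Prop := ∀ (s : String) (t : String), Dom_make_subsequence s t → Spec_make_subsequence s t (make_subsequence s t)

-- ===== LEMMAS AND PROOFS =====

-- greedy match length, driven by s exactly like A's loop
def pvGreedy : List Char → List Char → Nat
  | _, [] => 0
  | [], _ :: _ => 0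
  | u :: us, c :: cs => if c == u then 1 + pvGreedy us cs else pvGreedy (u :: us) cs

theorem pvGreedy_le (ts cs : List Char) : pvGreedy ts cs ≤ ts.length := by
  induction cs generalizing ts with
  | nil => cases ts <;> simp [pvGreedy]
  | cons c cs ih =>
    cases ts with
    | nil => simp [pvGreedy]
    | cons u us =>
      simp only [pvGreedy, List.length_cons]
      split
      · have := ih us; omega
      · have := ih (u :: us); simp at this; omega

theorem pvIsSub_iff (ts cs : List Char) : pvIsSub ts cs = true ↔ ts.length ≤ pvGreedy ts cs := by
  induction cs generalizing ts with
  | nil => cases ts <;> simp [pvIsSub, pvGreedy]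
  | cons c cs ih =>
    cases ts with
    | nil => simp [pvIsSub, pvGreedy]
    | cons u us =>
      simp only [pvIsSub, pvGreedy, List.length_cons]
      split
      · rw [ih us]; omega
      · rw [ih (u :: us)]; simp

theorem pvGreedy_take (cs : List Char) : ∀ (ts : List Char) (k : Nat),
    pvGreedy (ts.take k) cs = min k (pvGreedy ts cs) := by
  induction cs with
  | nil => intro ts k; cases ts.take k <;> cases ts <;> simp [pvGreedy]
  | cons c cs ih =>
    intro ts k
    cases ts with
    | nil => simp [pvGreedy]
    | cons u us =>
      cases k with
      | zero => simp [pvGreedy]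
      | succ k =>
        simp only [List.take_succ_cons, pvGreedy]
        split
        · rw [ih us k]; omega
        · rw [show u :: List.take k us = (u :: us).take (k + 1) by simp, ih (u :: us) (k + 1)]

-- probing a prefix length k ≤ |t| answers "k ≤ greedy"
theorem pvIsSub_take_iff (tL sL : List Char) (k : Nat) (hk : k ≤ tL.length) :
    pvIsSub (tL.take k) sL = true ↔ k ≤ pvGreedy tL sL := by
  rw [pvIsSub_iff, pvGreedy_take, List.length_take]
  omega

theorem pvBSearch_eq (tL sL : List Char) : ∀ d lo hi, hi - lo = d → hi ≤ tL.length →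
    lo ≤ pvGreedy tL sL → pvGreedy tL sL ≤ hi → pvBSearch tL sL lo hi = pvGreedy tL sL := by
  intro d
  induction d using Nat.strong_induction_on with
  | _ d ih =>
    intro lo hi hd hhi hlo hhi2
    unfold pvBSearch
    by_cases h : lo < hi
    · rw [dif_pos h]
      simp only
      by_cases hp : pvIsSub (tL.take ((lo + hi + 1) / 2)) sL = true
      · rw [if_pos hp]
        have := (pvIsSub_take_iff tL sL ((lo + hi + 1) / 2) (by omega)).mp hp
        exact ih (hi - (lo + hi + 1) / 2) (by omega) _ _ rfl hhi this hhi2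
      · rw [if_neg hp]
        have : ¬ ((lo + hi + 1) / 2 ≤ pvGreedy tL sL) := fun hc =>
          hp ((pvIsSub_take_iff tL sL ((lo + hi + 1) / 2) (by omega)).mpr hc)
        exact ih ((lo + hi + 1) / 2 - 1 - lo) (by omega) _ _ rfl (by omega) hlo (by omega)
    · rw [dif_neg h]
      omega

-- A's fold, started at j, advances j by the greedy match of the rest of t
theorem pvFold_eq (tL : List Char) (cs : List Char) (j : Nat) :
    cs.foldl (fun j c =>
      if j < tL.length then
        match tL[j]? with
        | some u => if c == u then j + 1 else j
        | none => j
      else j) j = j + pvGreedy (tL.drop j) cs := by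
  induction cs generalizing j with
  | nil => cases h : tL.drop j <;> simp [pvGreedy]
  | cons c cs ih =>
    simp only [List.foldl_cons]
    cases hd : tL.drop j with
    | nil =>
      have hj : tL.length ≤ j := by
        have := List.drop_eq_nil_iff.mp hd; omega
      rw [if_neg (by omega), ih j, hd]
      cases cs <;> simp [pvGreedy]
    | cons u ts =>
      have hj : j < tL.length := by
        have := congrArg List.length hd; simp at this; omega
      have hget : tL[j]? = some u := by
        have h0 : (tL.drop j)[0]? = tL[j + 0]? := List.getElem?_drop
        rw [hd] at h0; simpa using h0.symm
      rw [if_pos hj, hget]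
      by_cases hcu : (c == u) = true
      · have hstep : (match some u with
            | some u => if (c == u) = true then j + 1 else j
            | none => j) = j + 1 := by simp [hcu]
        rw [hstep, ih (j + 1)]
        have hts : tL.drop (j + 1) = ts := by
          have : (tL.drop j).drop 1 = tL.drop (j + 1) := by rw [List.drop_drop]
          rw [hd] at this; simpa using this.symm
        rw [hts]
        simp only [pvGreedy, hcu, if_true]
        omega
      · have hstep : (match some u with
            | some u => if (c == u) = true then j + 1 else j
            | none => j) = j := by simp [hcu]
        rw [hstep, ih j, hd]
        simp [pvGreedy, hcu]

-- ===== VERDICT (by name: the statement is the Claim_ definition above) =====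
theorem make_subsequence_spec : Claim_equal_make_subsequence := by
  intro s t _
  unfold Spec_make_subsequence make_subsequence make_subsequence_alt
  simp only
  have hb : pvBSearch t.toList s.toList 0 t.toList.length = pvGreedy t.toList s.toList :=
    pvBSearch_eq t.toList s.toList _ 0 t.toList.length rfl le_rfl (Nat.zero_le _)
      (pvGreedy_le _ _)
  rw [hb]
  have hle := pvGreedy_le t.toList s.toList
  by_cases hs : s.toList = []
  · rw [if_pos hs, hs]
    cases t.toList <;> simp [pvGreedy]
  · rw [if_neg hs]
    by_cases ht : t.toList = []
    · rw [if_pos ht, ht]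
      cases s.toList <;> simp [pvGreedy]
    · rw [if_neg ht]
      have hfold := pvFold_eq t.toList s.toList 0
      simp only [List.drop_zero, Nat.zero_add] at hfold
      rw [hfold]
      set m := pvGreedy t.toList s.toList with hm
      by_cases hge : m ≥ t.toList.length
      · rw [if_pos hge]; omega
      · rw [if_neg hge]; rw [List.length_drop]; omega
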